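-- pv_equiv track=rewrite | github.com/adamsachs/NLP | DependencyParser/featureextractor.py | find_left_right_dependencies
-- ===== SOURCE A (Python) =====
-- def find_left_right_dependencies(idx, arcs):
--     left_most = 1000000
--     right_most = -1
--     dep_left_most = ''
--     dep_right_most = ''
--     for (wi, r, wj) in arcs:
--         if wi == idx:
--             if (wj > wi) and (wj > right_most):
--                 right_most = wj
--                 dep_right_most = r
--             if (wj < wi) and (wj < left_most):
--                 left_most = wj
--                 dep_left_most = r
--     return dep_left_most, dep_right_most, left_most, right_most
-- ===== SOURCE B (Python) =====
-- def find_left_right_dependencies(idx, arcs):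
--     dep_wjs = [wj for (wi, r, wj) in arcs if wi == idx]
--     left_most = min([wj for wj in dep_wjs if wj < idx] + [1000000])
--     right_most = max([wj for wj in dep_wjs if wj > idx] + [-1])
--     dep_left_most = '' if left_most == 1000000 else next(r for (wi, r, wj) in arcs if wi == idx and wj == left_most)
--     dep_right_most = '' if right_most == -1 else next(r for (wi, r, wj) in arcs if wi == idx and wj == right_most)
--     return dep_left_most, dep_right_most, left_most, right_most
-- ===== Notes on version B (the rewrite author's own statement) =====
-- stated objective: simpler
-- what changed: Replaces the four-variable accumulator loop by comprehensions: collect the dependent word indices, take min/max with the sentinel included in the candidate pool, and look the relation label up afterwards with next().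
import Mathlib
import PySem

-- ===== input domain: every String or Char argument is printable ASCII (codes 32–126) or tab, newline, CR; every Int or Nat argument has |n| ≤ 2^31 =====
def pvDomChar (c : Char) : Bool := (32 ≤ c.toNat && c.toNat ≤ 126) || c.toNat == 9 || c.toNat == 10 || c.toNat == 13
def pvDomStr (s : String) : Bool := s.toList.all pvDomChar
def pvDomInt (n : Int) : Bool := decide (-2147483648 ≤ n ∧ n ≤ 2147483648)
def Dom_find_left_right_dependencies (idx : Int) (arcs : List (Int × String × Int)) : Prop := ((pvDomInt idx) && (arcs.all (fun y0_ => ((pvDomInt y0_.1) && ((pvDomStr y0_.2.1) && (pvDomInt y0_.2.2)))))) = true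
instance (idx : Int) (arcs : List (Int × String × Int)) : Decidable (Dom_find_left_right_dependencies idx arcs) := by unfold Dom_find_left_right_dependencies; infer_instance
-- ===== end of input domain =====

-- B replaces A's single loop over four intertwined state variables by comprehensions: collect the
-- dependents' word indices, take min/max with the sentinel included in the candidate pool, and look
-- the relation label up afterwards (objective: simpler; same O(n) cost).

-- ===== PORT A =====
-- the loop body of A (one iteration of 'for (wi, r, wj) in arcs'); state = (left_most, right_most, dep_left_most, dep_right_most)
def pvStepA (idx : Int) (st : Int × Int × String × String) (a : Int × String × Int) : Int × Int × String × String :=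
  if a.1 == idx then
    let r1 : Int × String := if a.2.2 > a.1 ∧ a.2.2 > st.2.1 then (a.2.2, a.2.1) else (st.2.1, st.2.2.2)
    let l1 : Int × String := if a.2.2 < a.1 ∧ a.2.2 < st.1 then (a.2.2, a.2.1) else (st.1, st.2.2.1)
    (l1.1, r1.1, l1.2, r1.2)
  else st

def find_left_right_dependencies (idx : Int) (arcs : List (Int × String × Int)) : String × String × Int × Int :=
  let s := arcs.foldl (pvStepA idx) (1000000, -1, "", "")
  (s.2.2.1, s.2.2.2, s.1, s.2.1)

-- ===== PORT B =====
-- min(xs)/max(xs) on the (never empty) candidate pool is PySem.List.min?/max? with the identity key;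
-- the `none` fallback is unreachable (the pool always holds the sentinel). next(...) is find?+map;
-- its `.getD ""` is likewise unreachable: the minimum/maximum, when it is not the sentinel, is
-- attained by some arc, exactly as Source B's next() always finds one.
def find_left_right_dependencies_alt (idx : Int) (arcs : List (Int × String × Int)) : String × String × Int × Int :=
  let dep_wjs := (arcs.filter (fun a => a.1 == idx)).map (fun a => a.2.2)
  let left_most := match PySem.List.min? ((dep_wjs.filter (fun wj => wj < idx)) ++ [1000000]) (fun w => w) with
    | some m => m
    | none => 1000000
  let right_most := match PySem.List.max? ((dep_wjs.filter (fun wj => wj > idx)) ++ [-1]) (fun w => w) with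
    | some m => m
    | none => -1
  let dep_left_most := if left_most == 1000000 then "" else
    ((arcs.find? (fun a => a.1 == idx && a.2.2 == left_most)).map (fun a => a.2.1)).getD ""
  let dep_right_most := if right_most == -1 then "" else
    ((arcs.find? (fun a => a.1 == idx && a.2.2 == right_most)).map (fun a => a.2.1)).getD ""
  (dep_left_most, dep_right_most, left_most, right_most)

-- ===== PRECONDITION & SPEC =====
def Spec_find_left_right_dependencies (idx : Int) (arcs : List (Int × String × Int)) (out : String × String × Int × Int) : Prop := out = find_left_right_dependencies_alt idx arcs
instance (idx : Int) (arcs : List (Int × String × Int)) (out : String × String × Int × Int) : Decidable (Spec_find_left_right_dependencies idx arcs out) := by unfold Spec_find_left_right_dependencies; infer_instance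

-- ===== CLAIM (what is proved, stated in full; the proofs are below) =====
def Claim_equal_find_left_right_dependencies : Prop := ∀ (idx : Int) (arcs : List (Int × String × Int)), Dom_find_left_right_dependencies idx arcs → Spec_find_left_right_dependencies idx arcs (find_left_right_dependencies idx arcs)

-- ===== LEMMAS AND PROOFS =====

-- running first-minimum / first-maximum (by the third component) starting from m
def pvRunMin (m : Int × String × Int) (xs : List (Int × String × Int)) : Int × String × Int :=
  xs.foldl (fun m x => if x.2.2 < m.2.2 then x else m) m
def pvRunMax (m : Int × String × Int) (xs : List (Int × String × Int)) : Int × String × Int :=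
  xs.foldl (fun m x => if m.2.2 < x.2.2 then x else m) m

theorem pvRunMin_le (t : List (Int × String × Int)) : ∀ m, (pvRunMin m t).2.2 ≤ m.2.2 := by
  induction t with
  | nil => intro m; simp [pvRunMin]
  | cons b t ih =>
    intro m
    simp only [pvRunMin, List.foldl_cons]
    by_cases hb : b.2.2 < m.2.2
    · simp only [if_pos hb]
      exact le_trans (ih b) (le_of_lt hb)
    · simp only [if_neg hb]
      exact ih m

theorem pvRunMax_ge (t : List (Int × String × Int)) : ∀ m, m.2.2 ≤ (pvRunMax m t).2.2 := by
  induction t with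
  | nil => intro m; simp [pvRunMax]
  | cons b t ih =>
    intro m
    simp only [pvRunMax, List.foldl_cons]
    by_cases hb : m.2.2 < b.2.2
    · simp only [if_pos hb]
      exact le_trans (le_of_lt hb) (ih b)
    · simp only [if_neg hb]
      exact ih m

theorem pvRunMin_val (t : List (Int × String × Int)) : ∀ m, (pvRunMin m t).2.2 = (t.map (fun a => a.2.2)).foldl min m.2.2 := by
  induction t with
  | nil => intro m; simp [pvRunMin]
  | cons b t ih =>
    intro m
    simp only [pvRunMin, List.foldl_cons, List.map_cons]
    by_cases hb : b.2.2 < m.2.2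
    · rw [if_pos hb, show min m.2.2 b.2.2 = b.2.2 from by omega]
      exact ih b
    · rw [if_neg hb, show min m.2.2 b.2.2 = m.2.2 from by omega]
      exact ih m

theorem pvRunMax_val (t : List (Int × String × Int)) : ∀ m, (pvRunMax m t).2.2 = (t.map (fun a => a.2.2)).foldl max m.2.2 := by
  induction t with
  | nil => intro m; simp [pvRunMax]
  | cons b t ih =>
    intro m
    simp only [pvRunMax, List.foldl_cons, List.map_cons]
    by_cases hb : m.2.2 < b.2.2
    · rw [if_pos hb, show max m.2.2 b.2.2 = b.2.2 from by omega]
      exact ih b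
    · rw [if_neg hb, show max m.2.2 b.2.2 = m.2.2 from by omega]
      exact ih m

theorem pvRunMin_eq_self (t : List (Int × String × Int)) : ∀ m, (pvRunMin m t).2.2 = m.2.2 → pvRunMin m t = m := by
  induction t with
  | nil => intro m _; simp [pvRunMin]
  | cons b t ih =>
    intro m h
    simp only [pvRunMin, List.foldl_cons] at h ⊢
    by_cases hb : b.2.2 < m.2.2
    · rw [if_pos hb] at h
      have := pvRunMin_le t b
      exact absurd h (by simp only [pvRunMin] at this; omega)
    · rw [if_neg hb] at h ⊢
      exact ih m h

theorem pvRunMax_eq_self (t : List (Int × String × Int)) : ∀ m, (pvRunMax m t).2.2 = m.2.2 → pvRunMax m t = m := by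
  induction t with
  | nil => intro m _; simp [pvRunMax]
  | cons b t ih =>
    intro m h
    simp only [pvRunMax, List.foldl_cons] at h ⊢
    by_cases hb : m.2.2 < b.2.2
    · rw [if_pos hb] at h
      have := pvRunMax_ge t b
      exact absurd h (by simp only [pvRunMax] at this; omega)
    · rw [if_neg hb] at h ⊢
      exact ih m h

-- the running first-minimum IS the first element attaining the minimal key (once it beats the start)
theorem pvRunMin_find (t : List (Int × String × Int)) : ∀ m, (pvRunMin m t).2.2 < m.2.2 →
    t.find? (fun a => a.2.2 == (pvRunMin m t).2.2) = some (pvRunMin m t) := by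
  induction t with
  | nil => intro m h; simp [pvRunMin] at h
  | cons b t ih =>
    intro m h
    by_cases hb : b.2.2 < m.2.2
    · have hrw : pvRunMin m (b :: t) = pvRunMin b t := by
        simp only [pvRunMin, List.foldl_cons, if_pos hb]
      rw [hrw] at h ⊢
      by_cases he : (pvRunMin b t).2.2 = b.2.2
      · have hself : pvRunMin b t = b := pvRunMin_eq_self t b he
        rw [hself]
        exact List.find?_cons_of_pos (by simp)
      · have hlt : (pvRunMin b t).2.2 < b.2.2 := lt_of_le_of_ne (pvRunMin_le t b) he
        rw [List.find?_cons_of_neg (by simp; omega)]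
        exact ih b hlt
    · have hrw : pvRunMin m (b :: t) = pvRunMin m t := by
        simp only [pvRunMin, List.foldl_cons, if_neg hb]
      rw [hrw] at h ⊢
      rw [List.find?_cons_of_neg (by simp; omega)]
      exact ih m h

theorem pvRunMax_find (t : List (Int × String × Int)) : ∀ m, m.2.2 < (pvRunMax m t).2.2 →
    t.find? (fun a => a.2.2 == (pvRunMax m t).2.2) = some (pvRunMax m t) := by
  induction t with
  | nil => intro m h; simp [pvRunMax] at h
  | cons b t ih =>
    intro m h
    by_cases hb : m.2.2 < b.2.2
    · have hrw : pvRunMax m (b :: t) = pvRunMax b t := by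
        simp only [pvRunMax, List.foldl_cons, if_pos hb]
      rw [hrw] at h ⊢
      by_cases he : (pvRunMax b t).2.2 = b.2.2
      · have hself : pvRunMax b t = b := pvRunMax_eq_self t b he
        rw [hself]
        exact List.find?_cons_of_pos (by simp)
      · have hlt : b.2.2 < (pvRunMax b t).2.2 := lt_of_le_of_ne (pvRunMax_ge t b) (Ne.symm he)
        rw [List.find?_cons_of_neg (by simp; omega)]
        exact ih b hlt
    · have hrw : pvRunMax m (b :: t) = pvRunMax m t := by
        simp only [pvRunMax, List.foldl_cons, if_neg hb]
      rw [hrw] at h ⊢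
      rw [List.find?_cons_of_neg (by simp; omega)]
      exact ih m h

-- B's next(...) over all arcs finds the same arc as a search over the left/right side only
theorem pv_find_left (idx v : Int) (arcs : List (Int × String × Int)) (hv : v < idx) :
    arcs.find? (fun a => a.1 == idx && a.2.2 == v)
      = ((arcs.filter (fun a => a.1 == idx)).filter (fun a => a.2.2 < idx)).find? (fun a => a.2.2 == v) := by
  induction arcs with
  | nil => rfl
  | cons a t ih =>
    by_cases h1 : a.1 = idx
    · by_cases h2 : a.2.2 = v
      · have hlt : a.2.2 < idx := by omega
        simp [h1, h2, hv]
      · by_cases hlt : a.2.2 < idx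
        · simp [h1, h2, hlt, ih]
        · simp [h1, h2, hlt, ih]
    · simp [h1, ih]

theorem pv_find_right (idx v : Int) (arcs : List (Int × String × Int)) (hv : idx < v) :
    arcs.find? (fun a => a.1 == idx && a.2.2 == v)
      = ((arcs.filter (fun a => a.1 == idx)).filter (fun a => a.2.2 > idx)).find? (fun a => a.2.2 == v) := by
  induction arcs with
  | nil => rfl
  | cons a t ih =>
    by_cases h1 : a.1 = idx
    · by_cases h2 : a.2.2 = v
      · have hgt : idx < a.2.2 := by omega
        simp [h1, h2, hv]
      · by_cases hgt : idx < a.2.2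
        · simp [h1, h2, hgt, ih]
        · simp [h1, h2, hgt, ih]
    · simp [h1, ih]

-- A's loop, decomposed: the final state is the running min / running max over the two filtered sides
theorem pv_foldA (idx : Int) : ∀ (arcs : List (Int × String × Int)) (lm rm : Int) (dl dr : String) (cl cr : Int),
    arcs.foldl (pvStepA idx) (lm, rm, dl, dr) =
      ((pvRunMin (cl, dl, lm) (((arcs.filter (fun a => a.1 == idx)).filter (fun a => a.2.2 < idx)))).2.2,
       (pvRunMax (cr, dr, rm) (((arcs.filter (fun a => a.1 == idx)).filter (fun a => a.2.2 > idx)))).2.2,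
       (pvRunMin (cl, dl, lm) (((arcs.filter (fun a => a.1 == idx)).filter (fun a => a.2.2 < idx)))).2.1,
       (pvRunMax (cr, dr, rm) (((arcs.filter (fun a => a.1 == idx)).filter (fun a => a.2.2 > idx)))).2.1) := by
  intro arcs
  induction arcs with
  | nil => intro lm rm dl dr cl cr; simp [pvRunMin, pvRunMax]
  | cons a arcs ih =>
    intro lm rm dl dr cl cr
    by_cases hi : a.1 = idx
    · rcases lt_trichotomy a.2.2 idx with hlt | heq | hgt
      · -- left dependent
        have h1 : ¬ idx < a.2.2 := by omega
        by_cases hl : a.2.2 < lm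
        · have hstep : pvStepA idx (lm, rm, dl, dr) a = (a.2.2, rm, a.2.1, dr) := by
            simp [pvStepA, hi, h1, hl, hlt]
          rw [List.foldl_cons, hstep, ih _ _ _ _ a.1 cr]
          have ha : ((idx : Int), a.2) = a := by rw [← hi]
          simp [hi, hlt, h1, pvRunMin, hl, ha]
        · have hstep : pvStepA idx (lm, rm, dl, dr) a = (lm, rm, dl, dr) := by
            simp [pvStepA, hi, h1, hl]
          rw [List.foldl_cons, hstep, ih _ _ _ _ cl cr]
          simp [hi, hlt, h1, pvRunMin, hl]
      · -- a.2.2 = idx: neither side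
        have h1 : ¬ idx < a.2.2 := by omega
        have h2 : ¬ a.2.2 < idx := by omega
        have hstep : pvStepA idx (lm, rm, dl, dr) a = (lm, rm, dl, dr) := by
          simp [pvStepA, hi, h1, h2]
        rw [List.foldl_cons, hstep, ih _ _ _ _ cl cr]
        simp [hi, h1, h2]
      · -- right dependent
        have h2 : ¬ a.2.2 < idx := by omega
        by_cases hr : rm < a.2.2
        · have hstep : pvStepA idx (lm, rm, dl, dr) a = (lm, a.2.2, dl, a.2.1) := by
            simp [pvStepA, hi, h2, hr, hgt]
          rw [List.foldl_cons, hstep, ih _ _ _ _ cl a.1]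
          have ha : ((idx : Int), a.2) = a := by rw [← hi]
          simp [hi, hgt, h2, pvRunMax, hr, ha]
        · have hstep : pvStepA idx (lm, rm, dl, dr) a = (lm, rm, dl, dr) := by
            simp [pvStepA, hi, h2, hr]
          rw [List.foldl_cons, hstep, ih _ _ _ _ cl cr]
          simp [hi, hgt, h2, pvRunMax, hr]
    · have hstep : pvStepA idx (lm, rm, dl, dr) a = (lm, rm, dl, dr) := by simp [pvStepA, hi]
      rw [List.foldl_cons, hstep, ih _ _ _ _ cl cr]
      simp [hi]

-- B's min over the candidate pool (side values plus the sentinel) is A's running minimum's value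
theorem pv_left_val (idx : Int) (arcs : List (Int × String × Int)) :
    (match PySem.List.min? ((((arcs.filter (fun a => a.1 == idx)).map (fun a => a.2.2)).filter (fun wj => wj < idx)) ++ [1000000]) (fun w => w) with
      | some m => m
      | none => 1000000)
      = (pvRunMin ((0 : Int), "", (1000000 : Int)) ((arcs.filter (fun a => a.1 == idx)).filter (fun a => a.2.2 < idx))).2.2 := by
  rw [List.filter_map]
  simp only [Function.comp_def]
  rw [pvRunMin_val]
  cases hc : (arcs.filter (fun a => a.1 == idx)).filter (fun a => a.2.2 < idx) with
  | nil => rfl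
  | cons h t =>
    simp only [List.map_cons, List.cons_append, PySem.List.min?_id_cons, List.foldl_cons,
      List.foldl_append, List.foldl_cons, List.foldl_nil]
    rw [List.foldl_assoc]
    exact min_comm _ _

theorem pv_right_val (idx : Int) (arcs : List (Int × String × Int)) :
    (match PySem.List.max? ((((arcs.filter (fun a => a.1 == idx)).map (fun a => a.2.2)).filter (fun wj => wj > idx)) ++ [-1]) (fun w => w) with
      | some m => m
      | none => -1)
      = (pvRunMax ((0 : Int), "", (-1 : Int)) ((arcs.filter (fun a => a.1 == idx)).filter (fun a => a.2.2 > idx))).2.2 := by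
  rw [List.filter_map]
  simp only [Function.comp_def]
  rw [pvRunMax_val]
  cases hc : (arcs.filter (fun a => a.1 == idx)).filter (fun a => a.2.2 > idx) with
  | nil => rfl
  | cons h t =>
    simp only [List.map_cons, List.cons_append, PySem.List.max?_id_cons, List.foldl_cons,
      List.foldl_append, List.foldl_cons, List.foldl_nil]
    rw [List.foldl_assoc]
    exact max_comm _ _

-- ===== VERDICT (by name: the statement is the Claim_ definition above) =====
theorem find_left_right_dependencies_spec : Claim_equal_find_left_right_dependencies := by
  intro idx arcs _
  show find_left_right_dependencies idx arcs = find_left_right_dependencies_alt idx arcs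
  simp only [find_left_right_dependencies, find_left_right_dependencies_alt]
  rw [pv_foldA idx arcs 1000000 (-1) "" "" 0 0]
  rw [pv_left_val idx arcs, pv_right_val idx arcs]
  simp only [List.filter_filter]
  set L := arcs.filter (fun a => decide (a.2.2 < idx) && a.1 == idx) with hLdef
  set R := arcs.filter (fun a => decide (a.2.2 > idx) && a.1 == idx) with hRdef
  have keyL : ∀ v : Int, v < idx → arcs.find? (fun a => a.1 == idx && a.2.2 == v)
      = L.find? (fun a => a.2.2 == v) := by
    intro v hv
    rw [hLdef, ← List.filter_filter]
    exact pv_find_left idx v arcs hv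
  have keyR : ∀ v : Int, idx < v → arcs.find? (fun a => a.1 == idx && a.2.2 == v)
      = R.find? (fun a => a.2.2 == v) := by
    intro v hv
    rw [hRdef, ← List.filter_filter]
    exact pv_find_right idx v arcs hv
  have h1 : (if ((pvRunMin ((0 : Int), "", (1000000 : Int)) L).2.2 == 1000000) = true then ""
      else (Option.map (fun a => a.2.1) (arcs.find? (fun a => a.1 == idx && a.2.2 == (pvRunMin ((0 : Int), "", (1000000 : Int)) L).2.2))).getD "")
      = (pvRunMin ((0 : Int), "", (1000000 : Int)) L).2.1 := by
    by_cases hq : (pvRunMin ((0 : Int), "", (1000000 : Int)) L).2.2 = 1000000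
    · have hself := pvRunMin_eq_self L ((0 : Int), "", (1000000 : Int)) hq
      simp [hself]
    · have hle := pvRunMin_le L ((0 : Int), "", (1000000 : Int))
      dsimp only at hle
      have hfind := pvRunMin_find L ((0 : Int), "", (1000000 : Int)) (by dsimp only; omega)
      have hmem : pvRunMin ((0 : Int), "", (1000000 : Int)) L ∈ L := List.mem_of_find?_eq_some hfind
      have hv : (pvRunMin ((0 : Int), "", (1000000 : Int)) L).2.2 < idx := by
        rw [hLdef] at hmem
        have := (List.mem_filter.mp hmem).2
        simp at this
        exact this.1
      rw [if_neg (by simpa using hq), keyL _ hv, hfind]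
      rfl
  have h2 : (if ((pvRunMax ((0 : Int), "", (-1 : Int)) R).2.2 == -1) = true then ""
      else (Option.map (fun a => a.2.1) (arcs.find? (fun a => a.1 == idx && a.2.2 == (pvRunMax ((0 : Int), "", (-1 : Int)) R).2.2))).getD "")
      = (pvRunMax ((0 : Int), "", (-1 : Int)) R).2.1 := by
    by_cases hq : (pvRunMax ((0 : Int), "", (-1 : Int)) R).2.2 = -1
    · have hself := pvRunMax_eq_self R ((0 : Int), "", (-1 : Int)) hq
      simp [hself]
    · have hge := pvRunMax_ge R ((0 : Int), "", (-1 : Int))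
      dsimp only at hge
      have hfind := pvRunMax_find R ((0 : Int), "", (-1 : Int)) (by dsimp only; omega)
      have hmem : pvRunMax ((0 : Int), "", (-1 : Int)) R ∈ R := List.mem_of_find?_eq_some hfind
      have hv : idx < (pvRunMax ((0 : Int), "", (-1 : Int)) R).2.2 := by
        rw [hRdef] at hmem
        have := (List.mem_filter.mp hmem).2
        simp at this
        exact this.1
      rw [if_neg (by simpa using hq), keyR _ hv, hfind]
      rfl
  rw [h1, h2]
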